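-- pv_equiv track=rewrite | github.com/hishammoizuddin/omnipitch-ai | backend/graph/nodes.py | build_layout_sequence
-- ===== SOURCE A (Python) =====
-- from typing import Any, List, Literal, Tuple
--
-- LAYOUT_LIBRARY = [
--     "hero",
--     "insight-grid",
--     "process-flow",
--     "metrics-band",
--     "comparison",
--     "roadmap",
--     "closing",
-- ]
--
-- def build_layout_sequence(count: int) -> List[str]:
--     if count <= 0:
--         return []
--     if count <= len(LAYOUT_LIBRARY):
--         return LAYOUT_LIBRARY[:count]
--
--     middle = ["insight-grid", "metrics-band", "comparison", "process-flow"]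
--     sequence = ["hero"]
--     while len(sequence) < count - 2:
--         sequence.append(middle[(len(sequence) - 1) % len(middle)])
--     sequence.extend(["roadmap", "closing"])
--     return sequence[:count]
-- ===== SOURCE B (Python) =====
-- from typing import List
--
-- LAYOUT_LIBRARY = [
--     "hero",
--     "insight-grid",
--     "process-flow",
--     "metrics-band",
--     "comparison",
--     "roadmap",
--     "closing",
-- ]
--
-- def build_layout_sequence(count: int) -> List[str]:
--     if count <= 0:
--         return []
--     if count <= len(LAYOUT_LIBRARY):
--         return LAYOUT_LIBRARY[:count]
--     middle = ["insight-grid", "metrics-band", "comparison", "process-flow"]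
--     m = count - 3
--     return ["hero"] + (middle * (m // 4 + 1))[:m] + ["roadmap", "closing"]
-- ===== Notes on version B (the rewrite author's own statement) =====
-- stated objective: simpler
-- what changed: The growing while-loop that appends middle[(len(sequence)-1)%4] one element at a time is replaced by a closed-form construction: the cyclic middle block of length count-3 is built in one step by list repetition and slicing, avoiding per-element Python-level loop iterations.
import Mathlib
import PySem

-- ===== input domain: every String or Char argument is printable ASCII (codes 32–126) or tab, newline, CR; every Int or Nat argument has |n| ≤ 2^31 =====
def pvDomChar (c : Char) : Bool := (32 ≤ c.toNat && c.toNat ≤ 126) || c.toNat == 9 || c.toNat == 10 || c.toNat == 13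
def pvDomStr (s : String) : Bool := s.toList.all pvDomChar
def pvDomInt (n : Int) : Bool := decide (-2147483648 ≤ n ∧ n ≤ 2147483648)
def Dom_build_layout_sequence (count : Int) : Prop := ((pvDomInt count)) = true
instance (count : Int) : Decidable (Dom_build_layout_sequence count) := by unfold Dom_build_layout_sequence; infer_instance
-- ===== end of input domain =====

-- B replaces A's growing while-loop (append middle[(len-1)%4] until long enough) by a
-- closed-form construction of the cyclic middle block via list repetition and slicing (objective: simpler).

-- ===== PORT A =====
def pvLAYOUT_LIBRARY : List String :=
  ["hero", "insight-grid", "process-flow", "metrics-band", "comparison", "roadmap", "closing"]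

def pvMiddle : List String := ["insight-grid", "metrics-band", "comparison", "process-flow"]

-- the while-loop of A; middle[(len(sequence)-1) % len(middle)] is always in range (len ≥ 1),
-- so List.getD with a dummy default is exact here
def pvALoop (count : Int) (sequence : List String) : List String :=
  if ((sequence.length : Int)) < count - 2 then
    pvALoop count (sequence ++ [pvMiddle.getD (PySem.Int.mod ((sequence.length : Int) - 1) 4).toNat ""])
  else
    sequence
termination_by (count - 2 - (sequence.length : Int)).toNat
decreasing_by simp; omega

def build_layout_sequence (count : Int) : List String :=
  if count ≤ 0 then []
  else if count ≤ (pvLAYOUT_LIBRARY.length : Int) then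
    PySem.List.slice pvLAYOUT_LIBRARY none (some count)
  else
    let sequence := pvALoop count ["hero"]
    let sequence := sequence ++ ["roadmap", "closing"]
    PySem.List.slice sequence none (some count)

-- ===== PORT B =====
def build_layout_sequence_alt (count : Int) : List String :=
  if count ≤ 0 then []
  else if count ≤ (pvLAYOUT_LIBRARY.length : Int) then
    PySem.List.slice pvLAYOUT_LIBRARY none (some count)
  else
    let m := count - 3
    ["hero"] ++
      PySem.List.slice (List.flatten (List.replicate (PySem.Int.floordiv m 4 + 1).toNat pvMiddle)) none (some m) ++
      ["roadmap", "closing"]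

-- ===== PRECONDITION & SPEC =====
def Spec_build_layout_sequence (count : Int) (out : List String) : Prop := out = build_layout_sequence_alt count
instance (count : Int) (out : List String) : Decidable (Spec_build_layout_sequence count out) := by unfold Spec_build_layout_sequence; infer_instance

-- ===== CLAIM (what is proved, stated in full; the proofs are below) =====
def Claim_equal_build_layout_sequence : Prop := ∀ (count : Int), Dom_build_layout_sequence count → Spec_build_layout_sequence count (build_layout_sequence count)

-- ===== LEMMAS AND PROOFS =====

-- cyc k = the first k elements of the infinite cyclic middle pattern
def pvCyc : Nat → List String
  | 0 => []
  | k + 1 => pvCyc k ++ [pvMiddle.getD (k % 4) ""]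

theorem pvCyc_length (k : Nat) : (pvCyc k).length = k := by
  induction k with
  | zero => rfl
  | succ k ih => simp [pvCyc, ih]

-- the while-loop produces exactly the cyclic prefix of length m
theorem pvALoop_cyc (count : Int) (m : Nat) (hm : count - 2 = (m : Int) + 1) :
    ∀ k : Nat, k ≤ m → pvALoop count ("hero" :: pvCyc k) = "hero" :: pvCyc m := by
  intro k hk
  induction hmk : m - k generalizing k with
  | zero =>
    have : k = m := by omega
    subst this
    rw [pvALoop]
    simp [pvCyc_length, hm]
  | succ j ih =>
    have hkm : k < m := by omega
    rw [pvALoop]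
    have hlen : (("hero" :: pvCyc k).length : Int) = (k : Int) + 1 := by
      simp [pvCyc_length]
    rw [if_pos (by rw [hlen, hm]; exact_mod_cast by omega)]
    have hmod : (PySem.Int.mod ((("hero" :: pvCyc k).length : Int) - 1) 4).toNat = k % 4 := by
      rw [hlen]
      have : ((k : Int) + 1 - 1) = ((k : Nat) : Int) := by omega
      rw [this]
      have h4 : PySem.Int.mod (k : Int) 4 = ((k % 4 : Nat) : Int) := by
        exact_mod_cast PySem.Int.mod_natCast k 4
      rw [h4]
      omega
    rw [hmod]
    have : ("hero" :: pvCyc k) ++ [pvMiddle.getD (k % 4) ""] = "hero" :: pvCyc (k + 1) := by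
      simp [pvCyc]
    rw [this]
    exact ih (k + 1) (by omega) (by omega)

-- element i of the n-fold repetition of the 4-element middle pattern
theorem pvFlat_get (n i : Nat) (h : i < 4 * n) :
    (List.flatten (List.replicate n pvMiddle))[i]? = some (pvMiddle.getD (i % 4) "") := by
  induction n generalizing i with
  | zero => omega
  | succ n ih =>
    rw [List.replicate_succ, List.flatten_cons]
    by_cases h4 : i < 4
    · rw [List.getElem?_append_left (by simp [pvMiddle]; omega)]
      interval_cases i <;> rfl
    · rw [List.getElem?_append_right (by simp [pvMiddle]; omega)]
      have : pvMiddle.length = 4 := rfl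
      rw [this]
      have := ih (i - 4) (by omega)
      rw [this]
      congr 2
      omega

theorem pvTake_flat (n m : Nat) (h : m ≤ 4 * n) :
    (List.flatten (List.replicate n pvMiddle)).take m = pvCyc m := by
  induction m with
  | zero => simp [pvCyc]
  | succ m ih =>
    rw [List.take_add_one, ih (by omega), pvFlat_get n m (by omega)]
    simp [pvCyc]

-- ===== VERDICT (by name: the statement is the Claim_ definition above) =====
theorem build_layout_sequence_spec : Claim_equal_build_layout_sequence := by
  intro count _
  unfold Spec_build_layout_sequence build_layout_sequence build_layout_sequence_alt
  by_cases h0 : count ≤ 0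
  · simp [h0]
  · rw [if_neg h0, if_neg h0]
    by_cases h7 : count ≤ (pvLAYOUT_LIBRARY.length : Int)
    · rw [if_pos h7, if_pos h7]
    · rw [if_neg h7, if_neg h7]
      dsimp only
      have hlen : (pvLAYOUT_LIBRARY.length : Int) = 7 := rfl
      rw [hlen] at h7
      set m : Nat := (count - 3).toNat with hmdef
      have hm3 : count - 3 = (m : Int) := by omega
      -- A side
      have hA : pvALoop count ["hero"] = "hero" :: pvCyc m := by
        have := pvALoop_cyc count m (by omega) 0 (by omega)
        simpa [pvCyc] using this
      rw [hA]
      -- B side: m // 4 + 1 repetitions suffice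
      have hfd : PySem.Int.floordiv (count - 3) 4 = ((m / 4 : Nat) : Int) := by
        rw [hm3]; exact_mod_cast PySem.Int.floordiv_natCast m 4
      rw [hfd]
      have hn : (((m / 4 : Nat) : Int) + 1).toNat = m / 4 + 1 := by omega
      rw [hn]
      have hslice : PySem.List.slice (List.flatten (List.replicate (m / 4 + 1) pvMiddle)) none (some (count - 3)) = pvCyc m := by
        rw [hm3, PySem.List.slice_to_natCast]
        exact pvTake_flat (m / 4 + 1) m (by omega)
      rw [hslice]
      -- final slice on A's side: the list already has length count
      have hAlen : (("hero" :: pvCyc m) ++ ["roadmap", "closing"]).length = count.toNat := by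
        simp [pvCyc_length]; omega
      have hc : count = ((count.toNat : Nat) : Int) := by omega
      rw [hc, PySem.List.slice_to_natCast, ← hAlen, List.take_length]
      simp
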